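-- pv_equiv track=rewrite | github.com/bekmirzayevelnur/code | galati_jadval.py | jadval
-- ===== SOURCE A (Python) =====
-- def jadval(satr, ustun):
--     if satr==1 and ustun==1: return 0
--     start=1
--     while start<=satr:
--         start*=2
--     start//=2
--     r = start-ustun
--     if r>=0:
--         nat = ustun*start*(start-1)//2
--     else:
--         nat = start*start*(start-1)//2
--         nat += -r * (start*(start-1)//2+start*start)
--     if start==satr: return nat
--     n = ustun
--     m = satr-start
--     if n>start:
--         nat += start*m*start
--         nat += jadval(start, m)
--         n -= start;
--         if n<m:
--             nat+=jadval(m, n)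
--         else:
--             nat+=jadval(n,m)
-- #code by ave_owner
--     else:
--         nat += start*n*m;
--         if n<m:
--             nat+=jadval(m, n)
--         else:
--             nat+=jadval(n,m)
--     return nat;
-- ===== SOURCE B (Python) =====
-- def _node(s, u):
--     """Local contribution of node (s, u) and the child pairs to visit."""
--     if s == 1 and u == 1:
--         return 0, []
--     start = 1
--     while start <= s:
--         start *= 2
--     start //= 2
--     r = start - u
--     if r >= 0:
--         loc = u * start * (start - 1) // 2
--     else:
--         loc = start * start * (start - 1) // 2 + (-r) * (start * (start - 1) // 2 + start * start)
--     if start == s: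
--         return loc, []
--     m = s - start
--     if u > start:
--         n = u - start
--         return loc + start * m * start, [(start, m), (m, n) if n < m else (n, m)]
--     return loc + start * u * m, [(m, u) if u < m else (u, m)]
--
--
-- def jadval(satr, ustun):
--     total = 0
--     stack = [(satr, ustun)]
--     while stack:
--         s, u = stack.pop()
--         loc, kids = _node(s, u)
--         total += loc
--         stack.extend(kids)
--     return total
-- ===== Notes on version B (the rewrite author's own statement) =====
-- stated objective: alternative
-- what changed: A's self-recursive tree walk is replaced by an iterative explicit-stack traversal: B pops (satr, ustun) pairs from a work list, adds each node's local contribution to a running total, and pushes the child pairs A would have recursed on.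
import Mathlib
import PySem

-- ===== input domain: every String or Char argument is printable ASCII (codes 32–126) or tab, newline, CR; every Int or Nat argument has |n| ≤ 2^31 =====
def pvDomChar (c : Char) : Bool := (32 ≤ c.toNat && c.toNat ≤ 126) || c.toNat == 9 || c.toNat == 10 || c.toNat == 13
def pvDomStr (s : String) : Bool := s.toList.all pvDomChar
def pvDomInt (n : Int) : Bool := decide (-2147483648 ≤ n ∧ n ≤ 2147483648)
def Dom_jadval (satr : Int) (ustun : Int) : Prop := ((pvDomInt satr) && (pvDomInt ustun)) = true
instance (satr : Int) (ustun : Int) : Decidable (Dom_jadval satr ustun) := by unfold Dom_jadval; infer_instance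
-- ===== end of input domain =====

-- B replaces A's recursion by an explicit work stack with a running total (same values, iterative decomposition); return-value equivalence only.

-- ===== PORT A =====
-- the `while start <= satr: start *= 2` loop of A (and of B); the Nat fuel is a
-- pure transcription guard: 66 doublings cover every |satr| ≤ 2^65, far beyond Dom
def startAuxF : Nat → Int → Int → Int
  | 0, _, st => st
  | n + 1, satr, st => if st ≤ satr then startAuxF n satr (st * 2) else st

-- fuel makes A's recursion total in Lean (none = fuel exhausted; a transcription guard, not part of A)
def jadvalF : Nat → Int → Int → Option Int
  | 0, _, _ => none
  | Nat.succ fuel, satr, ustun =>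
    if satr = 1 ∧ ustun = 1 then some 0
    else
      let start := PySem.Int.floordiv (startAuxF 66 satr 1) 2
      let r := start - ustun
      let nat0 :=
        if r ≥ 0 then PySem.Int.floordiv (ustun * start * (start - 1)) 2
        else PySem.Int.floordiv (start * start * (start - 1)) 2
              + (-r) * (PySem.Int.floordiv (start * (start - 1)) 2 + start * start)
      if start = satr then some nat0
      else
        let n := ustun
        let m := satr - start
        if n > start then
          match jadvalF fuel start m with
          | none => none
          | some a =>
            let n := n - start
            match (if n < m then jadvalF fuel m n else jadvalF fuel n m) with
            | none => none
            | some b => some (nat0 + start * m * start + a + b)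
        else
          match (if n < m then jadvalF fuel m n else jadvalF fuel n m) with
          | none => none
          | some b => some (nat0 + start * n * m + b)

-- fuel 2^32+2 is proved sufficient on Dom ∧ Pre (lemma jadvalF_total below)
def jadval (satr : Int) (ustun : Int) : Int := (jadvalF 4294967298 satr ustun).getD 0

-- ===== PORT B =====
-- B's helper _node: local contribution of a node and the child pairs to visit
def nodeVal (s : Int) (u : Int) : Int × List (Int × Int) :=
  if s = 1 ∧ u = 1 then (0, [])
  else
    let start := PySem.Int.floordiv (startAuxF 66 s 1) 2
    let r := start - u
    let loc :=
      if r ≥ 0 then PySem.Int.floordiv (u * start * (start - 1)) 2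
      else PySem.Int.floordiv (start * start * (start - 1)) 2
            + (-r) * (PySem.Int.floordiv (start * (start - 1)) 2 + start * start)
    if start = s then (loc, [])
    else
      let m := s - start
      if u > start then
        let n := u - start
        (loc + start * m * start, [(start, m), if n < m then (m, n) else (n, m)])
      else
        (loc + start * u * m, [if u < m then (m, u) else (u, m)])

-- B's while-stack loop; the stack top is the list head (python pops/extends at the
-- end, hence kids.reverse); fuel bounds the number of iterations (a guard only)
def jadvalLoop : Nat → List (Int × Int) → Int → Option Int
  | 0, _, _ => none
  | Nat.succ fuel, stack, total =>
    match stack with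
    | [] => some total
    | (s, u) :: rest =>
      let p := nodeVal s u
      jadvalLoop fuel (p.2.reverse ++ rest) (total + p.1)

-- fuel 1 + 3*(2^32+2) iterations, proved sufficient on Dom ∧ Pre (bridge lemma below)
def jadval_alt (satr : Int) (ustun : Int) : Int := (jadvalLoop 12884901895 [(satr, ustun)] 0).getD 0

-- ===== PRECONDITION & SPEC =====
-- Pre_ excludes exactly the inputs with both arguments negative, on which the Python A
-- recurses forever (RecursionError) and B's loop never empties its stack.
def Pre_jadval (satr : Int) (ustun : Int) : Prop := ¬(satr < 0 ∧ ustun < 0)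
instance (satr : Int) (ustun : Int) : Decidable (Pre_jadval satr ustun) := by unfold Pre_jadval; infer_instance
def pvWitness_jadval : Int × Int := (13, 7)

def Spec_jadval (satr : Int) (ustun : Int) (out : Int) : Prop := out = jadval_alt satr ustun
instance (satr : Int) (ustun : Int) (out : Int) : Decidable (Spec_jadval satr ustun out) := by unfold Spec_jadval; infer_instance

-- ===== CLAIM (what is proved, stated in full; the proofs are below) =====
def Claim_equal_jadval : Prop := ∀ (satr : Int) (ustun : Int), Dom_jadval satr ustun → Pre_jadval satr ustun → Spec_jadval satr ustun (jadval satr ustun)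

-- ===== LEMMAS AND PROOFS =====

lemma startAuxF_gt : ∀ (n : Nat) (s st : Int), s < st → startAuxF n s st = st
  | 0, _, _, _ => rfl
  | n + 1, s, st, h => by rw [startAuxF, if_neg (by omega)]

lemma floordiv_double (x : Int) : PySem.Int.floordiv (2 * x) 2 = x := by
  rw [PySem.Int.floordiv_eq_ediv_of_pos (by norm_num)]
  exact Int.mul_ediv_cancel_left x two_ne_zero

lemma startAuxF_shape : ∀ (n : Nat) (s : Int) (j : Nat), ∃ k : Nat, j ≤ k ∧ k ≤ j + n ∧
    startAuxF n s ((2:Int) ^ j) = 2 ^ k ∧ ((2:Int) ^ j ≤ 2 * s → (2:Int) ^ k ≤ 2 * s) := by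
  intro n
  induction n with
  | zero => intro s j; exact ⟨j, le_rfl, by omega, rfl, fun h => h⟩
  | succ n ih =>
    intro s j
    by_cases h : (2:Int) ^ j ≤ s
    · obtain ⟨k, h1, h2, h3, h4⟩ := ih s (j + 1)
      refine ⟨k, by omega, by omega, ?_, fun _ => h4 (by rw [pow_succ]; omega)⟩
      rw [startAuxF, if_pos h, show ((2:Int) ^ j * 2) = 2 ^ (j + 1) from (pow_succ 2 j).symm]
      exact h3
    · exact ⟨j, le_rfl, by omega, by rw [startAuxF, if_neg h], fun hh => hh⟩

lemma startAuxF_chain : ∀ (n i j : Nat), i ≤ j → j - i + 1 ≤ n →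
    startAuxF n ((2:Int) ^ j) ((2:Int) ^ i) = 2 ^ (j + 1) := by
  intro n
  induction n with
  | zero => intro i j h1 h2; exact absurd h2 (by omega)
  | succ n ih =>
    intro i j h1 h2
    rw [startAuxF, if_pos (pow_le_pow_right₀ (by norm_num) h1),
      show ((2:Int) ^ i * 2) = 2 ^ (i + 1) from (pow_succ 2 i).symm]
    by_cases hij : i = j
    · subst hij
      exact startAuxF_gt n _ _
        (pow_lt_pow_right₀ (by norm_num : (1:Int) < 2) (by omega))
    · exact ih (i + 1) j (by omega) (by omega)

lemma start_nonpos (s : Int) (hs : s ≤ 0) : PySem.Int.floordiv (startAuxF 66 s 1) 2 = 0 := by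
  rw [startAuxF_gt 66 s 1 (by omega), PySem.Int.floordiv_eq_ediv_of_pos (by norm_num)]
  decide

-- shape of A's `start` for s ≥ 1: R = startAuxF 66 s 1 is a power of two, 2 ≤ R ≤ 2s
lemma startR_shape (s : Int) (hs : 1 ≤ s) :
    ∃ k : Nat, 1 ≤ k ∧ k ≤ 66 ∧ startAuxF 66 s 1 = (2:Int) ^ k ∧ (2:Int) ^ k ≤ 2 * s := by
  have h1 : startAuxF 66 s 1 = startAuxF 65 s ((2:Int) ^ 1) := by
    rw [startAuxF, if_pos (by omega)]; norm_num
  obtain ⟨k, hk1, hk2, hk3, hk4⟩ := startAuxF_shape 65 s 1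
  exact ⟨k, hk1, by omega, by rw [h1, hk3], hk4 (by norm_num; omega)⟩

-- convenient bounds for s ≥ 1
lemma start_bounds (s : Int) (hs : 1 ≤ s) :
    1 ≤ PySem.Int.floordiv (startAuxF 66 s 1) 2 ∧ PySem.Int.floordiv (startAuxF 66 s 1) 2 ≤ s := by
  obtain ⟨k, hk1, _, hk3, hk4⟩ := startR_shape s hs
  match k, hk1, hk3, hk4 with
  | i + 1, _, hk3, hk4 =>
    rw [hk3, show ((2:Int) ^ (i + 1)) = 2 * 2 ^ i by rw [pow_succ]; ring, floordiv_double]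
    have h1 : (1:Int) ≤ 2 ^ i := one_le_pow₀ (by norm_num)
    rw [show ((2:Int) ^ (i + 1)) = 2 * 2 ^ i by rw [pow_succ]; ring] at hk4
    exact ⟨by omega, by omega⟩

-- recomputing `start` from `start` gives `start` back (the (start, m) child is a leaf)
lemma start_idem (s : Int) :
    PySem.Int.floordiv (startAuxF 66 (PySem.Int.floordiv (startAuxF 66 s 1) 2) 1) 2
      = PySem.Int.floordiv (startAuxF 66 s 1) 2 := by
  by_cases hs : 1 ≤ s
  · obtain ⟨k, hk1, hk2, hk3, _⟩ := startR_shape s hs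
    match k, hk1, hk2, hk3 with
    | i + 1, _, hk2, hk3 =>
      rw [hk3, show ((2:Int) ^ (i + 1)) = 2 * 2 ^ i by rw [pow_succ]; ring, floordiv_double,
        show ((1:Int)) = (2:Int) ^ (0:Nat) by norm_num,
        startAuxF_chain 66 0 i (by omega) (by omega),
        show ((2:Int) ^ (i + 1)) = 2 * 2 ^ i by rw [pow_succ]; ring, floordiv_double]
  · rw [start_nonpos s (by omega), start_nonpos 0 (by omega)]

-- termination measure for A's recursion on Pre_
def measJ (s u : Int) : Nat := s.toNat + u.toNat + (if s < 0 then 1 else 0)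

lemma jadvalLoop_cons (fuel : Nat) (s u : Int) (rest : List (Int × Int)) (total : Int) :
    jadvalLoop (fuel + 1) ((s, u) :: rest) total
      = jadvalLoop fuel ((nodeVal s u).2.reverse ++ rest) (total + (nodeVal s u).1) := rfl

lemma jadvalF_total : ∀ (k : Nat) (s u : Int), Pre_jadval s u → measJ s u ≤ k →
    ∀ f : Nat, k < f → (jadvalF f s u).isSome := by
  intro k
  induction k with
  | zero =>
    intro s u hpre hmu f hf
    have hs0 : s = 0 := by unfold measJ at hmu; split at hmu <;> omega
    subst hs0
    match f, hf with
    | Nat.succ f, _ =>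
      simp only [jadvalF]
      rw [if_neg (show ¬((0:Int) = 1 ∧ u = 1) by omega),
        if_pos (start_nonpos 0 (by omega))]
      rfl
  | succ k ih =>
    intro s u hpre hmu f hf
    match f, hf with
    | Nat.succ f, hf =>
      have hfk : k < f := by omega
      simp only [jadvalF]
      by_cases hb : s = 1 ∧ u = 1
      · rw [if_pos hb]; rfl
      rw [if_neg hb]
      by_cases hss : PySem.Int.floordiv (startAuxF 66 s 1) 2 = s
      · rw [if_pos hss]; rfl
      rw [if_neg hss]
      have hpre' : ¬(s < 0 ∧ u < 0) := hpre
      have hEfacts : (1 ≤ s → 1 ≤ PySem.Int.floordiv (startAuxF 66 s 1) 2 ∧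
            PySem.Int.floordiv (startAuxF 66 s 1) 2 ≤ s) ∧
          (s ≤ 0 → PySem.Int.floordiv (startAuxF 66 s 1) 2 = 0) := by
        constructor
        · intro h; exact start_bounds s h
        · intro h; exact start_nonpos s h
      obtain ⟨hpos, hzer⟩ := hEfacts
      by_cases hs1 : 1 ≤ s
      · obtain ⟨h1E, hEs⟩ := hpos hs1
        by_cases hn : u > PySem.Int.floordiv (startAuxF 66 s 1) 2
        · rw [if_pos hn]
          obtain ⟨a, ha⟩ := Option.isSome_iff_exists.mp
            (ih (PySem.Int.floordiv (startAuxF 66 s 1) 2) (s - PySem.Int.floordiv (startAuxF 66 s 1) 2)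
              (by unfold Pre_jadval; omega)
              (by unfold measJ at *; split at hmu <;> split <;> omega) f hfk)
          rw [ha]
          by_cases hcmp : u - PySem.Int.floordiv (startAuxF 66 s 1) 2
              < s - PySem.Int.floordiv (startAuxF 66 s 1) 2
          · rw [if_pos hcmp]
            obtain ⟨b, hbq⟩ := Option.isSome_iff_exists.mp
              (ih (s - PySem.Int.floordiv (startAuxF 66 s 1) 2)
                (u - PySem.Int.floordiv (startAuxF 66 s 1) 2)
                (by unfold Pre_jadval; omega)
                (by unfold measJ at *; split at hmu <;> split <;> omega) f hfk)
            rw [hbq]; rfl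
          · rw [if_neg hcmp]
            obtain ⟨b, hbq⟩ := Option.isSome_iff_exists.mp
              (ih (u - PySem.Int.floordiv (startAuxF 66 s 1) 2)
                (s - PySem.Int.floordiv (startAuxF 66 s 1) 2)
                (by unfold Pre_jadval; omega)
                (by unfold measJ at *; split at hmu <;> split <;> omega) f hfk)
            rw [hbq]; rfl
        · rw [if_neg hn]
          by_cases hcmp : u < s - PySem.Int.floordiv (startAuxF 66 s 1) 2
          · rw [if_pos hcmp]
            obtain ⟨b, hbq⟩ := Option.isSome_iff_exists.mp
              (ih (s - PySem.Int.floordiv (startAuxF 66 s 1) 2) u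
                (by unfold Pre_jadval; omega)
                (by unfold measJ at *; split at hmu <;> split <;> omega) f hfk)
            rw [hbq]; rfl
          · rw [if_neg hcmp]
            obtain ⟨b, hbq⟩ := Option.isSome_iff_exists.mp
              (ih u (s - PySem.Int.floordiv (startAuxF 66 s 1) 2)
                (by unfold Pre_jadval; omega)
                (by unfold measJ at *; split at hmu <;> split <;> omega) f hfk)
            rw [hbq]; rfl
      · have hE0 := hzer (by omega)
        have hsneg : s < 0 := by omega
        have hu0 : 0 ≤ u := by omega
        by_cases hn : u > PySem.Int.floordiv (startAuxF 66 s 1) 2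
        · rw [if_pos hn]
          obtain ⟨a, ha⟩ := Option.isSome_iff_exists.mp
            (ih (PySem.Int.floordiv (startAuxF 66 s 1) 2) (s - PySem.Int.floordiv (startAuxF 66 s 1) 2)
              (by unfold Pre_jadval; omega)
              (by unfold measJ at *; split at hmu <;> split <;> omega) f hfk)
          rw [ha]
          by_cases hcmp : u - PySem.Int.floordiv (startAuxF 66 s 1) 2
              < s - PySem.Int.floordiv (startAuxF 66 s 1) 2
          · exfalso; omega
          · rw [if_neg hcmp]
            obtain ⟨b, hbq⟩ := Option.isSome_iff_exists.mp
              (ih (u - PySem.Int.floordiv (startAuxF 66 s 1) 2)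
                (s - PySem.Int.floordiv (startAuxF 66 s 1) 2)
                (by unfold Pre_jadval; omega)
                (by unfold measJ at *; split at hmu <;> split <;> omega) f hfk)
            rw [hbq]; rfl
        · rw [if_neg hn]
          by_cases hcmp : u < s - PySem.Int.floordiv (startAuxF 66 s 1) 2
          · exfalso; omega
          · rw [if_neg hcmp]
            obtain ⟨b, hbq⟩ := Option.isSome_iff_exists.mp
              (ih u (s - PySem.Int.floordiv (startAuxF 66 s 1) 2)
                (by unfold Pre_jadval; omega)
                (by unfold measJ at *; split at hmu <;> split <;> omega) f hfk)
            rw [hbq]; rfl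

lemma jadvalLoop_mono : ∀ (g g' : Nat) (st : List (Int × Int)) (t w : Int), g ≤ g' →
    jadvalLoop g st t = some w → jadvalLoop g' st t = some w := by
  intro g
  induction g with
  | zero => intro g' st t w _ h; simp [jadvalLoop] at h
  | succ g ih =>
    intro g' st t w hle h
    match g', hle with
    | Nat.succ g', hle =>
      match st with
      | [] => exact h
      | (s, u) :: rest =>
        rw [jadvalLoop_cons] at h ⊢
        exact ih g' _ _ _ (by omega) h

lemma nodeVal_leaf (f : Nat) (s u a : Int) (hfix : PySem.Int.floordiv (startAuxF 66 s 1) 2 = s)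
    (h : jadvalF (f + 1) s u = some a) : nodeVal s u = (a, []) := by
  simp only [jadvalF] at h
  rw [nodeVal]
  by_cases hb : s = 1 ∧ u = 1
  · rw [if_pos hb] at h ⊢
    injection h with h'
    rw [h']
  · rw [if_neg hb] at h ⊢
    simp only [hfix] at h ⊢
    rw [if_true] at h ⊢
    injection h with h'
    rw [h']

lemma bridge : ∀ (f : Nat) (s u v : Int), jadvalF f s u = some v →
    ∀ (rest : List (Int × Int)) (total w : Int) (g : Nat),
      jadvalLoop g rest (total + v) = some w →
      jadvalLoop (g + 3 * f) ((s, u) :: rest) total = some w := by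
  intro f
  induction f with
  | zero => intro s u v h; simp [jadvalF] at h
  | succ f ih =>
    intro s u v h rest total w g hloop
    rw [show g + 3 * (f + 1) = (g + 3 * f + 2) + 1 by ring, jadvalLoop_cons]
    simp only [jadvalF] at h
    by_cases hb : s = 1 ∧ u = 1
    · rw [if_pos hb] at h
      injection h with hv
      have hnode : nodeVal s u = (0, []) := by rw [nodeVal, if_pos hb]
      rw [hnode]
      simp only [List.reverse_nil, List.nil_append]
      exact jadvalLoop_mono g _ _ _ _ (by omega)
        (by rw [show total + (0:Int) = total + v by omega]; exact hloop)
    rw [if_neg hb] at h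
    by_cases hss : PySem.Int.floordiv (startAuxF 66 s 1) 2 = s
    · rw [if_pos hss] at h
      injection h with hv
      simp only [hss] at hv
      have hnode : nodeVal s u = (v, []) := by
        rw [nodeVal, if_neg hb]
        simp only [hss]
        rw [if_true, hv]
      rw [hnode]
      simp only [List.reverse_nil, List.nil_append]
      exact jadvalLoop_mono g _ _ _ _ (by omega) hloop
    rw [if_neg hss] at h
    by_cases hn : u > PySem.Int.floordiv (startAuxF 66 s 1) 2
    · rw [if_pos hn] at h
      cases hA : jadvalF f (PySem.Int.floordiv (startAuxF 66 s 1) 2)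
          (s - PySem.Int.floordiv (startAuxF 66 s 1) 2) with
      | none => rw [hA] at h; exact absurd h (by simp)
      | some a =>
        rw [hA] at h
        match f, ih, hA, h with
        | Nat.succ f', ih, hA, h =>
          have hleaf : nodeVal (PySem.Int.floordiv (startAuxF 66 s 1) 2)
              (s - PySem.Int.floordiv (startAuxF 66 s 1) 2) = (a, []) :=
            nodeVal_leaf f' _ _ a (start_idem s) hA
          by_cases hcmp : u - PySem.Int.floordiv (startAuxF 66 s 1) 2
              < s - PySem.Int.floordiv (startAuxF 66 s 1) 2
          · rw [if_pos hcmp] at h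
            cases hB : jadvalF (f' + 1) (s - PySem.Int.floordiv (startAuxF 66 s 1) 2)
                (u - PySem.Int.floordiv (startAuxF 66 s 1) 2) with
            | none => rw [hB] at h; exact absurd h (by simp)
            | some b =>
              rw [hB] at h
              injection h with hv
              have hnode : nodeVal s u =
                  ((if PySem.Int.floordiv (startAuxF 66 s 1) 2 - u ≥ 0 then
                      PySem.Int.floordiv (u * PySem.Int.floordiv (startAuxF 66 s 1) 2 *
                        (PySem.Int.floordiv (startAuxF 66 s 1) 2 - 1)) 2
                    else
                      PySem.Int.floordiv (PySem.Int.floordiv (startAuxF 66 s 1) 2 *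
                          PySem.Int.floordiv (startAuxF 66 s 1) 2 *
                          (PySem.Int.floordiv (startAuxF 66 s 1) 2 - 1)) 2
                        + (-(PySem.Int.floordiv (startAuxF 66 s 1) 2 - u)) *
                          (PySem.Int.floordiv (PySem.Int.floordiv (startAuxF 66 s 1) 2 *
                              (PySem.Int.floordiv (startAuxF 66 s 1) 2 - 1)) 2
                            + PySem.Int.floordiv (startAuxF 66 s 1) 2 *
                              PySem.Int.floordiv (startAuxF 66 s 1) 2))
                    + PySem.Int.floordiv (startAuxF 66 s 1) 2 *
                      (s - PySem.Int.floordiv (startAuxF 66 s 1) 2) *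
                      PySem.Int.floordiv (startAuxF 66 s 1) 2,
                    [(PySem.Int.floordiv (startAuxF 66 s 1) 2,
                      s - PySem.Int.floordiv (startAuxF 66 s 1) 2),
                     (s - PySem.Int.floordiv (startAuxF 66 s 1) 2,
                      u - PySem.Int.floordiv (startAuxF 66 s 1) 2)]) := by
                rw [nodeVal, if_neg hb]
                simp only [if_neg hss, if_pos hn, if_pos hcmp]
              rw [hnode]
              have hrev : (((PySem.Int.floordiv (startAuxF 66 s 1) 2,
                    s - PySem.Int.floordiv (startAuxF 66 s 1) 2) ::
                    [(s - PySem.Int.floordiv (startAuxF 66 s 1) 2,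
                      u - PySem.Int.floordiv (startAuxF 66 s 1) 2)]).reverse ++ rest)
                  = (s - PySem.Int.floordiv (startAuxF 66 s 1) 2,
                      u - PySem.Int.floordiv (startAuxF 66 s 1) 2) ::
                    (PySem.Int.floordiv (startAuxF 66 s 1) 2,
                      s - PySem.Int.floordiv (startAuxF 66 s 1) 2) :: rest := rfl
              rw [hrev]
              have step1 : jadvalLoop (g + 1)
                  ((PySem.Int.floordiv (startAuxF 66 s 1) 2,
                    s - PySem.Int.floordiv (startAuxF 66 s 1) 2) :: rest)
                  (total + (nodeVal s u).1 + b) = some w := by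
                rw [jadvalLoop_cons, hleaf]
                simp only [List.reverse_nil, List.nil_append]
                rw [show total + (nodeVal s u).1 + b + a = total + v by rw [hnode]; omega]
                exact hloop
              have step2 := ih (s - PySem.Int.floordiv (startAuxF 66 s 1) 2)
                (u - PySem.Int.floordiv (startAuxF 66 s 1) 2) b hB
                ((PySem.Int.floordiv (startAuxF 66 s 1) 2,
                  s - PySem.Int.floordiv (startAuxF 66 s 1) 2) :: rest)
                (total + (nodeVal s u).1) w (g + 1) (by rw [hnode]; rw [hnode] at step1; exact step1)
              rw [hnode] at step2
              exact jadvalLoop_mono (g + 1 + 3 * (f' + 1)) _ _ _ _ (by omega) step2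
          · rw [if_neg hcmp] at h
            cases hB : jadvalF (f' + 1) (u - PySem.Int.floordiv (startAuxF 66 s 1) 2)
                (s - PySem.Int.floordiv (startAuxF 66 s 1) 2) with
            | none => rw [hB] at h; exact absurd h (by simp)
            | some b =>
              rw [hB] at h
              injection h with hv
              have hnode : nodeVal s u = ((nodeVal s u).1,
                  [(PySem.Int.floordiv (startAuxF 66 s 1) 2,
                    s - PySem.Int.floordiv (startAuxF 66 s 1) 2),
                   (u - PySem.Int.floordiv (startAuxF 66 s 1) 2,
                    s - PySem.Int.floordiv (startAuxF 66 s 1) 2)]) ∧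
                  (nodeVal s u).1 = (if PySem.Int.floordiv (startAuxF 66 s 1) 2 - u ≥ 0 then
                      PySem.Int.floordiv (u * PySem.Int.floordiv (startAuxF 66 s 1) 2 *
                        (PySem.Int.floordiv (startAuxF 66 s 1) 2 - 1)) 2
                    else
                      PySem.Int.floordiv (PySem.Int.floordiv (startAuxF 66 s 1) 2 *
                          PySem.Int.floordiv (startAuxF 66 s 1) 2 *
                          (PySem.Int.floordiv (startAuxF 66 s 1) 2 - 1)) 2
                        + (-(PySem.Int.floordiv (startAuxF 66 s 1) 2 - u)) *
                          (PySem.Int.floordiv (PySem.Int.floordiv (startAuxF 66 s 1) 2 *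
                              (PySem.Int.floordiv (startAuxF 66 s 1) 2 - 1)) 2
                            + PySem.Int.floordiv (startAuxF 66 s 1) 2 *
                              PySem.Int.floordiv (startAuxF 66 s 1) 2))
                    + PySem.Int.floordiv (startAuxF 66 s 1) 2 *
                      (s - PySem.Int.floordiv (startAuxF 66 s 1) 2) *
                      PySem.Int.floordiv (startAuxF 66 s 1) 2 := by
                constructor
                · rw [nodeVal, if_neg hb]
                  simp only [if_neg hss, if_pos hn, if_neg hcmp]
                · rw [nodeVal, if_neg hb]
                  simp only [if_neg hss, if_pos hn, if_neg hcmp]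
              obtain ⟨hnode1, hnode2⟩ := hnode
              rw [hnode1]
              have hrev : (((PySem.Int.floordiv (startAuxF 66 s 1) 2,
                    s - PySem.Int.floordiv (startAuxF 66 s 1) 2) ::
                    [(u - PySem.Int.floordiv (startAuxF 66 s 1) 2,
                      s - PySem.Int.floordiv (startAuxF 66 s 1) 2)]).reverse ++ rest)
                  = (u - PySem.Int.floordiv (startAuxF 66 s 1) 2,
                      s - PySem.Int.floordiv (startAuxF 66 s 1) 2) ::
                    (PySem.Int.floordiv (startAuxF 66 s 1) 2,
                      s - PySem.Int.floordiv (startAuxF 66 s 1) 2) :: rest := rfl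
              rw [hrev]
              have step1 : jadvalLoop (g + 1)
                  ((PySem.Int.floordiv (startAuxF 66 s 1) 2,
                    s - PySem.Int.floordiv (startAuxF 66 s 1) 2) :: rest)
                  (total + (nodeVal s u).1 + b) = some w := by
                rw [jadvalLoop_cons, hleaf]
                simp only [List.reverse_nil, List.nil_append]
                rw [show total + (nodeVal s u).1 + b + a = total + v by rw [hnode2]; omega]
                exact hloop
              have step2 := ih (u - PySem.Int.floordiv (startAuxF 66 s 1) 2)
                (s - PySem.Int.floordiv (startAuxF 66 s 1) 2) b hB
                ((PySem.Int.floordiv (startAuxF 66 s 1) 2,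
                  s - PySem.Int.floordiv (startAuxF 66 s 1) 2) :: rest)
                (total + (nodeVal s u).1) w (g + 1) step1
              exact jadvalLoop_mono (g + 1 + 3 * (f' + 1)) _ _ _ _ (by omega) step2
    · rw [if_neg hn] at h
      by_cases hcmp : u < s - PySem.Int.floordiv (startAuxF 66 s 1) 2
      · rw [if_pos hcmp] at h
        cases hB : jadvalF f (s - PySem.Int.floordiv (startAuxF 66 s 1) 2) u with
        | none => rw [hB] at h; exact absurd h (by simp)
        | some b =>
          rw [hB] at h
          injection h with hv
          have hnode1 : nodeVal s u = ((nodeVal s u).1,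
              [(s - PySem.Int.floordiv (startAuxF 66 s 1) 2, u)]) := by
            rw [nodeVal, if_neg hb]
            simp only [if_neg hss, if_neg hn, if_pos hcmp]
          have hnode2 : (nodeVal s u).1 + b = v := by
            rw [nodeVal, if_neg hb]
            simp only [if_neg hss, if_neg hn, if_pos hcmp]
            omega
          rw [hnode1]
          have hrev : ([(s - PySem.Int.floordiv (startAuxF 66 s 1) 2, u)].reverse ++ rest)
              = (s - PySem.Int.floordiv (startAuxF 66 s 1) 2, u) :: rest := rfl
          rw [hrev]
          have step1 : jadvalLoop g rest (total + (nodeVal s u).1 + b) = some w := by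
            rw [show total + (nodeVal s u).1 + b = total + v by omega]
            exact hloop
          have step2 := ih (s - PySem.Int.floordiv (startAuxF 66 s 1) 2) u b hB
            rest (total + (nodeVal s u).1) w g step1
          exact jadvalLoop_mono (g + 3 * f) _ _ _ _ (by omega) step2
      · rw [if_neg hcmp] at h
        cases hB : jadvalF f u (s - PySem.Int.floordiv (startAuxF 66 s 1) 2) with
        | none => rw [hB] at h; exact absurd h (by simp)
        | some b =>
          rw [hB] at h
          injection h with hv
          have hnode1 : nodeVal s u = ((nodeVal s u).1,
              [(u, s - PySem.Int.floordiv (startAuxF 66 s 1) 2)]) := by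
            rw [nodeVal, if_neg hb]
            simp only [if_neg hss, if_neg hn, if_neg hcmp]
          have hnode2 : (nodeVal s u).1 + b = v := by
            rw [nodeVal, if_neg hb]
            simp only [if_neg hss, if_neg hn, if_neg hcmp]
            omega
          rw [hnode1]
          have hrev : ([(u, s - PySem.Int.floordiv (startAuxF 66 s 1) 2)].reverse ++ rest)
              = (u, s - PySem.Int.floordiv (startAuxF 66 s 1) 2) :: rest := rfl
          rw [hrev]
          have step1 : jadvalLoop g rest (total + (nodeVal s u).1 + b) = some w := by
            rw [show total + (nodeVal s u).1 + b = total + v by omega]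
            exact hloop
          have step2 := ih u (s - PySem.Int.floordiv (startAuxF 66 s 1) 2) b hB
            rest (total + (nodeVal s u).1) w g step1
          exact jadvalLoop_mono (g + 3 * f) _ _ _ _ (by omega) step2

-- ===== VERDICT (by name: the statement is the Claim_ definition above) =====
theorem jadval_spec : Claim_equal_jadval := by
  intro satr ustun hdom hpre
  unfold Spec_jadval
  have hmu : measJ satr ustun ≤ 4294967297 := by
    unfold Dom_jadval pvDomInt at hdom
    rw [Bool.and_eq_true, decide_eq_true_eq, decide_eq_true_eq] at hdom
    unfold measJ
    split <;> omega
  have hv := jadvalF_total 4294967297 satr ustun hpre hmu 4294967298 (by norm_num)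
  obtain ⟨v, hveq⟩ := Option.isSome_iff_exists.mp hv
  have base : jadvalLoop 1 [] ((0:Int) + v) = some ((0:Int) + v) := rfl
  have hbr := bridge 4294967298 satr ustun v hveq [] 0 ((0:Int) + v) 1 base
  unfold jadval jadval_alt
  rw [hveq, show (12884901895:Nat) = 1 + 3 * 4294967298 by norm_num, hbr]
  simp
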